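-- pv_equiv track=rewrite | github.com/openai/parameter-golf | hailmary/orchestrate_hailmary.py | partition_gpus
-- ===== SOURCE A (Python) =====
-- def partition_gpus(gpus: list[str], slot_ids: list[str], min_nproc_per_slot: int = 1) -> list[tuple[str, str, int]]:
--     if not slot_ids:
--         raise SystemExit("At least one slot is required to partition GPUs.")
--     if len(slot_ids) > len(gpus):
--         raise SystemExit(f"Need at least {len(slot_ids)} GPUs for {len(slot_ids)} slots, only {len(gpus)} provided.")
--     total = len(gpus)
--     slot_count = len(slot_ids)
--     base = total // slot_count
--     extra = total % slot_count
--     if base < min_nproc_per_slot: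
--         raise SystemExit(
--             f"Cannot allocate at least {min_nproc_per_slot} GPU(s) to each of {slot_count} slots with only {total} GPUs."
--         )
--     allocations: list[tuple[str, str, int]] = []
--     offset = 0
--     for index, slot_id in enumerate(slot_ids):
--         width = base + (1 if index < extra else 0)
--         gpu_group = gpus[offset : offset + width]
--         allocations.append((slot_id, ",".join(gpu_group), width))
--         offset += width
--     return allocations
-- ===== SOURCE B (Python) =====
-- def partition_gpus(gpus: list[str], slot_ids: list[str], min_nproc_per_slot: int = 1) -> list[tuple[str, str, int]]:
--     if not slot_ids:
--         raise SystemExit("At least one slot is required to partition GPUs.")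
--     if len(slot_ids) > len(gpus):
--         raise SystemExit(f"Need at least {len(slot_ids)} GPUs for {len(slot_ids)} slots, only {len(gpus)} provided.")
--     total = len(gpus)
--     slot_count = len(slot_ids)
--     base = total // slot_count
--     extra = total % slot_count
--     if base < min_nproc_per_slot:
--         raise SystemExit(
--             f"Cannot allocate at least {min_nproc_per_slot} GPU(s) to each of {slot_count} slots with only {total} GPUs."
--         )
--
--     def start(i: int) -> int:
--         # closed-form offset of slot i: the first min(i, extra) slots got one extra GPU
--         return i * base + min(i, extra)
--
--     return [
--         (slot_id, ",".join(gpus[start(i):start(i + 1)]), start(i + 1) - start(i))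
--         for i, slot_id in enumerate(slot_ids)
--     ]
-- ===== Notes on version B (the rewrite author's own statement) =====
-- stated objective: alternative
-- what changed: Replaced the sequential running-offset accumulator loop with a comprehension that computes each slot's slice bounds independently in closed form (start(i) = i*base + min(i, extra)), making the slots independent of each other.
import Mathlib
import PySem

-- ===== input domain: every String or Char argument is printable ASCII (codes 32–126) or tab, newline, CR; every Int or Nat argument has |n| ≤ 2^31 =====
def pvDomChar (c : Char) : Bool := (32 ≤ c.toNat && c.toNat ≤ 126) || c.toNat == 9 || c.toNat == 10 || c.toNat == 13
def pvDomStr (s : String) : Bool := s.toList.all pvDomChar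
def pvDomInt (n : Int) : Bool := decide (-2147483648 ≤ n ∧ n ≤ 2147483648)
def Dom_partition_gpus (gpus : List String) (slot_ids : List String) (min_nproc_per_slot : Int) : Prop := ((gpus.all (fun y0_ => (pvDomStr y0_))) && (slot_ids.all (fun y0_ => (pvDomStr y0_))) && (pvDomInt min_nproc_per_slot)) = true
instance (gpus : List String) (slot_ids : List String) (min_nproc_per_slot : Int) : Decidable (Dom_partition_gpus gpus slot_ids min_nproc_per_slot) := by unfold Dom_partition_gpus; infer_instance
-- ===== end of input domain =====

-- B replaces A's running-offset accumulator with an independent closed-form slice bound per slot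
-- (start i = i*base + min i extra); alternative decomposition, same cost.


-- ===== PORT A =====
-- A's three SystemExit guards are excluded by Pre_partition_gpus; on admitted inputs A runs the
-- enumerate loop with a running offset accumulator.
def partition_gpus (gpus : List String) (slot_ids : List String) (min_nproc_per_slot : Int) : List (String × String × Int) :=
  let total : Int := gpus.length
  let slot_count : Int := slot_ids.length
  let base : Int := PySem.Int.floordiv total slot_count
  let extra : Int := PySem.Int.mod total slot_count
  ((PySem.List.enumerate slot_ids 0).foldl
    (fun (st : List (String × String × Int) × Int) p =>
      let width : Int := base + (if p.1 < extra then 1 else 0)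
      let gpu_group := PySem.List.slice gpus (some st.2) (some (st.2 + width))
      (st.1 ++ [(p.2, PySem.Str.join "," gpu_group, width)], st.2 + width))
    ([], 0)).1

-- ===== PORT B =====
def partition_gpus_alt (gpus : List String) (slot_ids : List String) (min_nproc_per_slot : Int) : List (String × String × Int) :=
  let total : Int := gpus.length
  let slot_count : Int := slot_ids.length
  let base : Int := PySem.Int.floordiv total slot_count
  let extra : Int := PySem.Int.mod total slot_count
  let start : Int → Int := fun i => i * base + min i extra
  (PySem.List.enumerate slot_ids 0).map
    (fun p =>
      (p.2, PySem.Str.join "," (PySem.List.slice gpus (some (start p.1)) (some (start (p.1 + 1)))),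
       start (p.1 + 1) - start p.1))

-- ===== PRECONDITION & SPEC =====
-- Pre_ excludes exactly the three SystemExit guards of A: empty slot_ids, more slots than GPUs,
-- and base GPUs-per-slot below min_nproc_per_slot.
def Pre_partition_gpus (gpus : List String) (slot_ids : List String) (min_nproc_per_slot : Int) : Prop :=
  slot_ids ≠ [] ∧ (slot_ids.length : Int) ≤ gpus.length ∧
    min_nproc_per_slot ≤ PySem.Int.floordiv gpus.length slot_ids.length
instance (gpus : List String) (slot_ids : List String) (min_nproc_per_slot : Int) : Decidable (Pre_partition_gpus gpus slot_ids min_nproc_per_slot) := by unfold Pre_partition_gpus; infer_instance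
def pvWitness_partition_gpus : List String × List String × Int := (["g0", "g1", "g2"], ["s0", "s1"], 1)
def Spec_partition_gpus (gpus : List String) (slot_ids : List String) (min_nproc_per_slot : Int) (out : List (String × String × Int)) : Prop := out = partition_gpus_alt gpus slot_ids min_nproc_per_slot
instance (gpus : List String) (slot_ids : List String) (min_nproc_per_slot : Int) (out : List (String × String × Int)) : Decidable (Spec_partition_gpus gpus slot_ids min_nproc_per_slot out) := by unfold Spec_partition_gpus; infer_instance

-- ===== CLAIM (what is proved, stated in full; the proofs are below) =====
def Claim_equal_partition_gpus : Prop := ∀ (gpus : List String) (slot_ids : List String) (min_nproc_per_slot : Int), Dom_partition_gpus gpus slot_ids min_nproc_per_slot → Pre_partition_gpus gpus slot_ids min_nproc_per_slot → Spec_partition_gpus gpus slot_ids min_nproc_per_slot (partition_gpus gpus slot_ids min_nproc_per_slot)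

-- ===== LEMMAS AND PROOFS =====

-- Loop invariant: starting the fold at index s with offset s*base + min s extra, the fold's
-- first component extends acc by exactly B's closed-form map over the remaining slots.
theorem partition_loop_eq (gpus : List String) (base extra : Int) :
    ∀ (ss : List String) (s : Int) (acc : List (String × String × Int)),
      ((PySem.List.enumerate ss s).foldl
        (fun (st : List (String × String × Int) × Int) p =>
          let width : Int := base + (if p.1 < extra then 1 else 0)
          let gpu_group := PySem.List.slice gpus (some st.2) (some (st.2 + width))
          (st.1 ++ [(p.2, PySem.Str.join "," gpu_group, width)], st.2 + width))
        (acc, s * base + min s extra)).1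
      = acc ++ (PySem.List.enumerate ss s).map
          (fun p =>
            (p.2, PySem.Str.join "," (PySem.List.slice gpus
                (some (p.1 * base + min p.1 extra))
                (some ((p.1 + 1) * base + min (p.1 + 1) extra))),
             ((p.1 + 1) * base + min (p.1 + 1) extra) - (p.1 * base + min p.1 extra))) := by
  intro ss
  induction ss with
  | nil => intro s acc; simp [PySem.List.enumerate_nil]
  | cons x xs ih =>
    intro s acc
    rw [PySem.List.enumerate_cons]
    simp only [List.foldl_cons, List.map_cons]
    have hoff : s * base + min s extra + (base + (if s < extra then 1 else 0))
        = (s + 1) * base + min (s + 1) extra := by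
      rcases (by omega : extra ≤ s ∨ s < extra) with h | h
      · have h1 : min s extra = extra := min_eq_right h
        have h2 : min (s + 1) extra = extra := min_eq_right (by omega)
        rw [h1, h2, if_neg (by omega)]; ring
      · have h1 : min s extra = s := min_eq_left (by omega)
        have h2 : min (s + 1) extra = s + 1 := min_eq_left (by omega)
        rw [h1, h2, if_pos h]; ring
    have hwidth : base + (if s < extra then 1 else 0)
        = ((s + 1) * base + min (s + 1) extra) - (s * base + min s extra) := by omega
    rw [hwidth] at hoff ⊢
    rw [hoff, ih (s + 1)]
    simp only [List.append_assoc, List.singleton_append]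

-- ===== VERDICT (by name: the statement is the Claim_ definition above) =====
theorem partition_gpus_spec : Claim_equal_partition_gpus := by
  intro gpus slot_ids m _ _
  unfold Spec_partition_gpus partition_gpus partition_gpus_alt
  simp only []
  have hextra : (0 : Int) ≤ PySem.Int.mod gpus.length slot_ids.length := by
    rw [PySem.Int.mod_natCast]; exact Int.natCast_nonneg _
  have h := partition_loop_eq gpus
    (PySem.Int.floordiv gpus.length slot_ids.length)
    (PySem.Int.mod gpus.length slot_ids.length) slot_ids 0 []
  rw [show ((0 : Int) * (PySem.Int.floordiv gpus.length slot_ids.length)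
      + min 0 (PySem.Int.mod gpus.length slot_ids.length)) = 0 by
    rw [min_eq_left hextra]; ring] at h
  rw [h]
  simp only [List.nil_append]
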